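-- pv_equiv track=rewrite | github.com/andrewsu/su_openai_dev | prompts.py | score_return
-- ===== SOURCE A (Python) =====
-- def score_return(response, expected):
--     score = 0
--     #true positives
--     for key, value in expected.items():
--         if key in response:
--             score += 1
--             if response[key] == value:
--                 score += 1
--         else:
--             score -= 1
--     #false positives
--     for key, value in response.items():
--         if key not in expected:
--             score -= 1
--     return(score)
-- ===== SOURCE B (Python) =====
-- def score_return(response, expected):
--     remaining = dict(response)
--     score = 0
--     for key, value in expected.items():
--         if key in remaining:
--             score += 2 if remaining.pop(key) == value else 1
--         else:
--             score -= 1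
--     return score - len(remaining)
-- ===== Notes on version B (the rewrite author's own statement) =====
-- stated objective: alternative
-- what changed: Single pass over expected that deletes each matched key from a working copy of response (scoring via pop), then subtracts the size of the leftover dict; A's second loop over response and its membership test against expected disappear.
import Mathlib
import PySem

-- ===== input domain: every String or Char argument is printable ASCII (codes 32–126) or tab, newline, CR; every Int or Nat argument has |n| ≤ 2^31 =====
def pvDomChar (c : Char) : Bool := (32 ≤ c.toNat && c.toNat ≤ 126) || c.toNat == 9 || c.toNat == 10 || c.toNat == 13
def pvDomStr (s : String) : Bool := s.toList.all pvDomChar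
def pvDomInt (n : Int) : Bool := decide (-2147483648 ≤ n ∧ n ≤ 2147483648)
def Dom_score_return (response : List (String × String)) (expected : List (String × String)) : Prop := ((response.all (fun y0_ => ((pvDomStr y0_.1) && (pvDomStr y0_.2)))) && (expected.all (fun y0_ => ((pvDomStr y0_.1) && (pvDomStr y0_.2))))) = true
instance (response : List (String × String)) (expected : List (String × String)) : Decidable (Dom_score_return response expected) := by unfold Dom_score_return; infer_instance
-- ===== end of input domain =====

-- B replaces A's two loops (scan expected with membership tests against response, then scan
-- response with membership tests against expected) by a single pass over expected that POPS each
-- matched key from a working copy of response and finally subtracts the size of the leftover dict;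
-- objective: alternative (same cost, different algorithm).


-- ===== PORT A =====
def score_return (response : List (String × String)) (expected : List (String × String)) : Int :=
  let score : Int := 0
  -- true positives
  let score := expected.foldl (fun score kv =>
    if PySem.Dict.contains (PySem.Dict.mk response) kv.1 then
      let score := score + 1
      if PySem.Dict.get? (PySem.Dict.mk response) kv.1 == some kv.2 then score + 1 else score
    else score - 1) score
  -- false positives
  response.foldl (fun score kv =>
    if PySem.Dict.contains (PySem.Dict.mk expected) kv.1 then score else score - 1) score

-- ===== PORT B =====
-- remaining = dict(response); one pass over expected popping matched keys; score - len(remaining)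
def score_return_alt (response : List (String × String)) (expected : List (String × String)) : Int :=
  let st := expected.foldl
    (fun (st : Int × PySem.Dict String String) kv =>
      if PySem.Dict.contains st.2 kv.1 then
        ((if PySem.Dict.get? st.2 kv.1 == some kv.2 then st.1 + 2 else st.1 + 1),
         PySem.Dict.erase st.2 kv.1)
      else (st.1 - 1, st.2))
    ((0 : Int), PySem.Dict.mk response)
  st.1 - (PySem.Dict.size st.2 : Int)

-- ===== PRECONDITION & SPEC =====
-- Pre_ excludes association lists with duplicate keys, which do not represent any Python dict
-- (both arguments are dicts in A, so A never receives such an input).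
def Pre_score_return (response : List (String × String)) (expected : List (String × String)) : Prop :=
  (response.map Prod.fst).Nodup ∧ (expected.map Prod.fst).Nodup
instance (response : List (String × String)) (expected : List (String × String)) : Decidable (Pre_score_return response expected) := by unfold Pre_score_return; infer_instance
def pvWitness_score_return : (List (String × String)) × (List (String × String)) :=
  ([("a", "1"), ("c", "3")], [("a", "1"), ("b", "2")])
def Spec_score_return (response : List (String × String)) (expected : List (String × String)) (out : Int) : Prop := out = score_return_alt response expected
instance (response : List (String × String)) (expected : List (String × String)) (out : Int) : Decidable (Spec_score_return response expected out) := by unfold Spec_score_return; infer_instance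

-- ===== CLAIM (what is proved, stated in full; the proofs are below) =====
def Claim_equal_score_return : Prop := ∀ (response : List (String × String)) (expected : List (String × String)), Dom_score_return response expected → Pre_score_return response expected → Spec_score_return response expected (score_return response expected)

-- ===== LEMMAS AND PROOFS =====

-- A's two loops written as sums -----------------------------------------------------------------

lemma pv_foldl_add_shape {α : Type} (f g : α → Bool) (l : List α) (s : Int) :
    l.foldl (fun score kv =>
      if f kv then
        let score := score + 1
        if g kv then score + 1 else score
      else score - 1) s
    = s + (l.map (fun kv => if f kv then (if g kv then (2 : Int) else 1) else -1)).sum := by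
  rw [show (fun (score : Int) kv =>
      if f kv then
        let score := score + 1
        if g kv then score + 1 else score
      else score - 1) = (fun (score : Int) kv =>
        score + (if f kv then (if g kv then (2 : Int) else 1) else -1)) from by
    funext s kv; by_cases h1 : f kv <;> by_cases h2 : g kv <;> (simp [h1, h2]; try ring)]
  exact PySem.List.foldl_add l _ s

lemma pv_foldl_sub_shape {α : Type} (f : α → Bool) (l : List α) (s : Int) :
    l.foldl (fun score kv => if f kv then score else score - 1) s
    = s - ((l.filter (fun kv => !f kv)).length : Int) := by
  induction l generalizing s with
  | nil => simp
  | cons a t ih =>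
    by_cases h1 : f a <;> simp [h1, ih] <;> ring

-- lookups into a literal dict are unchanged by filtering out a DIFFERENT key ---------------------

lemma pv_get?_mk_filter_ne (l : List (String × String)) (k x : String) (h : ¬ x = k) :
    (PySem.Dict.mk (l.filter (fun p => !(p.1 == k)))).get? x = (PySem.Dict.mk l).get? x := by
  induction l with
  | nil => rfl
  | cons a t ih =>
    obtain ⟨a1, a2⟩ := a
    by_cases ha : (a1 == k) = true
    · have hax : ¬ (a1 == x) = true := by
        simp only [beq_iff_eq] at ha ⊢; intro he; exact h (he ▸ ha)
      simp [List.filter_cons, ha, PySem.Dict.get?_mk_cons, hax, ih]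
    · simp [List.filter_cons, ha, PySem.Dict.get?_mk_cons, ih]

lemma pv_contains_mk_filter_ne (l : List (String × String)) (k x : String) (h : ¬ x = k) :
    (PySem.Dict.mk (l.filter (fun p => !(p.1 == k)))).contains x = (PySem.Dict.mk l).contains x := by
  induction l with
  | nil => rfl
  | cons a t ih =>
    obtain ⟨a1, a2⟩ := a
    by_cases ha : (a1 == k) = true
    · have hax : ¬ (a1 == x) = true := by
        simp only [beq_iff_eq] at ha ⊢; intro he; exact h (he ▸ ha)
      simp only [PySem.Dict.contains_mk] at ih ⊢
      simp [List.filter_cons, ha, hax, ih]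
    · simp only [PySem.Dict.contains_mk] at ih ⊢
      simp [List.filter_cons, ha, ih]

-- erase on a literal dict filters the backing list ----------------------------------------------

lemma pv_erase_mk (l : List (String × String)) (k : String) :
    (PySem.Dict.mk l).erase k = PySem.Dict.mk (l.filter (fun p => !(p.1 == k))) := by
  apply PySem.Dict.ext; simp [PySem.Dict.erase, PySem.Dict.items]

lemma pv_contains_mk_iff (l : List (String × String)) (x : String) :
    (PySem.Dict.mk l).contains x = (l.map Prod.fst).contains x := by
  simp only [PySem.Dict.contains_mk]
  induction l with
  | nil => rfl
  | cons a t ih =>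
    by_cases h : x = a.1
    · simp [List.any_cons, h]
    · have h' : ¬ a.1 = x := fun he => h he.symm
      simp [List.any_cons, ih, beq_eq_false_iff_ne.mpr h, beq_eq_false_iff_ne.mpr h']

-- the invariant of B's single pass --------------------------------------------------------------

lemma pv_loop (exp : List (String × String)) :
    ∀ (l : List (String × String)) (s : Int), (exp.map Prod.fst).Nodup →
    (let st := exp.foldl
        (fun (st : Int × PySem.Dict String String) kv =>
          if PySem.Dict.contains st.2 kv.1 then
            ((if PySem.Dict.get? st.2 kv.1 == some kv.2 then st.1 + 2 else st.1 + 1),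
             PySem.Dict.erase st.2 kv.1)
          else (st.1 - 1, st.2))
        (s, PySem.Dict.mk l)
     st.1 - (PySem.Dict.size st.2 : Int))
    = s + (exp.map (fun kv =>
        if (PySem.Dict.mk l).contains kv.1 then
          (if (PySem.Dict.mk l).get? kv.1 == some kv.2 then (2 : Int) else 1)
        else -1)).sum
      - ((l.filter (fun kv => !((exp.map Prod.fst).contains kv.1))).length : Int) := by
  induction exp with
  | nil =>
    intro l s _
    simp [PySem.Dict.size]
  | cons a t ih =>
    intro l s hnd
    obtain ⟨k, v⟩ := a
    simp only [List.map_cons, List.nodup_cons] at hnd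
    obtain ⟨hk, hnt⟩ := hnd
    by_cases hc : (PySem.Dict.mk l).contains k = true
    · -- key present: score bumps, key is popped from the working dict
      simp only [List.foldl_cons, hc, if_true, pv_erase_mk]
      rw [ih (l.filter (fun p => !(p.1 == k))) _ hnt]
      -- later lookups are unchanged (t's keys differ from k)
      have hmap : (t.map (fun kv =>
          if (PySem.Dict.mk (l.filter (fun p => !(p.1 == k)))).contains kv.1 then
            (if (PySem.Dict.mk (l.filter (fun p => !(p.1 == k)))).get? kv.1 == some kv.2 then (2 : Int) else 1)
          else -1))
          = (t.map (fun kv =>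
          if (PySem.Dict.mk l).contains kv.1 then
            (if (PySem.Dict.mk l).get? kv.1 == some kv.2 then (2 : Int) else 1)
          else -1)) := by
        apply List.map_congr_left
        intro kv hm
        have hne : ¬ kv.1 = k := fun he => hk (he ▸ List.mem_map.mpr ⟨kv, hm, rfl⟩)
        rw [pv_get?_mk_filter_ne l k kv.1 hne, pv_contains_mk_filter_ne l k kv.1 hne]
      -- the two filters compose
      have hfil : (l.filter (fun p => !(p.1 == k))).filter
            (fun kv => !((t.map Prod.fst).contains kv.1))
          = l.filter (fun kv => !(((k :: t.map Prod.fst)).contains kv.1)) := by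
        rw [List.filter_filter]
        apply List.filter_congr
        intro kv _
        by_cases h1 : kv.1 = k <;> by_cases h2 : kv.1 ∈ t.map Prod.fst <;>
          simp [h1, h2, List.contains_iff_mem, List.mem_cons]
      rw [hmap, hfil, List.map_cons, List.sum_cons, if_pos hc]
      by_cases hg : (PySem.Dict.get? (PySem.Dict.mk l) k == some v) = true
      · simp only [if_pos hg, List.map_cons]; ring
      · simp only [if_neg hg, List.map_cons]; ring
    · -- key absent: score decremented, dict untouched; no pair of l has key k
      simp only [List.foldl_cons, if_neg hc]
      rw [ih l (s - 1) hnt]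
      have hfil : l.filter (fun kv => !((t.map Prod.fst).contains kv.1))
          = l.filter (fun kv => !(((k :: t.map Prod.fst)).contains kv.1)) := by
        apply List.filter_congr
        intro kv hm
        have h1 : ¬ kv.1 = k := by
          intro he
          apply hc
          rw [pv_contains_mk_iff]
          simp only [List.contains_iff_mem]
          exact he ▸ List.mem_map.mpr ⟨kv, hm, rfl⟩
        by_cases h2 : kv.1 ∈ t.map Prod.fst <;>
          simp [h1, h2, List.contains_iff_mem, List.mem_cons]
      rw [hfil, List.map_cons, List.sum_cons, if_neg hc]
      simp only [List.map_cons]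
      ring

theorem pv_main (response expected : List (String × String))
    (he : (expected.map Prod.fst).Nodup) :
    score_return response expected = score_return_alt response expected := by
  unfold score_return score_return_alt
  rw [pv_loop expected response 0 he]
  dsimp only
  rw [pv_foldl_add_shape, pv_foldl_sub_shape]
  have : (fun (kv : String × String) => !PySem.Dict.contains (PySem.Dict.mk expected) kv.1)
      = (fun kv => !((expected.map Prod.fst).contains kv.1)) := by
    funext kv; rw [pv_contains_mk_iff]
  rw [this]

-- ===== VERDICT (by name: the statement is the Claim_ definition above) =====
theorem score_return_spec : Claim_equal_score_return := by
  intro response expected _ hpre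
  unfold Spec_score_return
  exact pv_main response expected hpre.2
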